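-- pv_equiv track=rewrite | github.com/LuminaScript/sonic-mgmt | tests/community/route_helpers.py | _iter_route_prefixes
-- ===== SOURCE A (Python) =====
-- import ipaddress
--
-- ROUTE_NETWORK = ipaddress.IPv4Network("40.0.0.0/16")
--
-- def _iter_route_prefixes(num_routes):
--     """
--     Yield IPv4 /32 prefix strings (e.g. '40.0.0.1/32') for the stress test range.
--
--     Uses the same logic as before: 40.0.0.0/16, skipping .0 and .255 per /24.
--     """
--     base = int(ROUTE_NETWORK.network_address)
--     hosts_per_net = 254
--     for i in range(num_routes):
--         block = i // hosts_per_net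
--         host = (i % hosts_per_net) + 1
--         addr = ipaddress.IPv4Address(base + block * 256 + host)
--         yield f"{addr}/32"
-- ===== SOURCE B (Python) =====
-- ROUTE_NETWORK_BASE = 40 << 24  # int(IPv4Address("40.0.0.0"))
--
-- def _iter_route_prefixes(num_routes):
--     """
--     Yield IPv4 /32 prefix strings by walking a single running address pointer:
--     advance by 1 per route, and when landing on a .255 jump over .255 and .0.
--     """
--     addr = ROUTE_NETWORK_BASE
--     for _ in range(num_routes):
--         addr += 1
--         if addr % 256 == 255:
--             addr += 2
--         yield f"{addr // 16777216}.{addr // 65536 % 256}.{addr // 256 % 256}.{addr % 256}/32"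
-- ===== Notes on version B (the rewrite author's own statement) =====
-- stated objective: faster
-- what changed: Replaces A's per-index closed-form arithmetic (block = i//254, host = i%254+1 recomputed from scratch, plus an ipaddress.IPv4Address object per route) with a single running address pointer advancing by 1 per route, jumping over the .255/.0 pair at each block boundary and formatting the dotted quad directly.
import Mathlib
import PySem

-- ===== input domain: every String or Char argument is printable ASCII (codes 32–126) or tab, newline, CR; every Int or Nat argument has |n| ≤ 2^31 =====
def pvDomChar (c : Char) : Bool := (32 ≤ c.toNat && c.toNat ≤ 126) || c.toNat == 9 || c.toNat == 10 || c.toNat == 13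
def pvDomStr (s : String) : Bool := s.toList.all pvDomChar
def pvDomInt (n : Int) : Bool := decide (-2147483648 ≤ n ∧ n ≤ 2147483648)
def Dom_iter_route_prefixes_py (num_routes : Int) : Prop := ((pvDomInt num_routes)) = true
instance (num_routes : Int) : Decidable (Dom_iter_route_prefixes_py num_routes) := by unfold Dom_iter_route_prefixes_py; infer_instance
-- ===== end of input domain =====

-- B replaces A's per-index block/host division arithmetic with a running address
-- pointer that skips the .255/.0 pair; same output sequence, alternative decomposition.

-- str(ipaddress.IPv4Address(n)) ++ : dotted-quad rendering; exact for 0 ≤ n < 2^32,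
-- which holds for every address either port forms on Dom (num_routes ≤ 2^31).
def pvIpv4Str (n : Int) : String :=
  PySem.Int.toStr (PySem.Int.floordiv n 16777216) ++ "." ++
  PySem.Int.toStr (PySem.Int.mod (PySem.Int.floordiv n 65536) 256) ++ "." ++
  PySem.Int.toStr (PySem.Int.mod (PySem.Int.floordiv n 256) 256) ++ "." ++
  PySem.Int.toStr (PySem.Int.mod n 256)

-- ===== PORT A =====
def iter_route_prefixes_py (num_routes : Int) : List String :=
  (PySem.List.pyRange 0 num_routes 1).map (fun i =>
    let block := PySem.Int.floordiv i 254
    let host := PySem.Int.mod i 254 + 1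
    pvIpv4Str (671088640 + block * 256 + host) ++ "/32")

-- ===== PORT B =====
-- the 'for _ in range(num_routes)' loop of Source B; one cons per route
def pvAltGo : Nat → Int → List String
  | 0, _ => []
  | Nat.succ k, addr =>
      let addr := addr + 1
      let addr := if PySem.Int.mod addr 256 = 255 then addr + 2 else addr
      (pvIpv4Str addr ++ "/32") :: pvAltGo k addr

def iter_route_prefixes_py_alt (num_routes : Int) : List String :=
  pvAltGo num_routes.toNat 671088640

-- ===== PRECONDITION & SPEC =====
def Spec_iter_route_prefixes_py (num_routes : Int) (out : List String) : Prop := out = iter_route_prefixes_py_alt num_routes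
instance (num_routes : Int) (out : List String) : Decidable (Spec_iter_route_prefixes_py num_routes out) := by unfold Spec_iter_route_prefixes_py; infer_instance

-- ===== CLAIM (what is proved, stated in full; the proofs are below) =====
def Claim_equal_iter_route_prefixes_py : Prop := ∀ (num_routes : Int), Dom_iter_route_prefixes_py num_routes → Spec_iter_route_prefixes_py num_routes (iter_route_prefixes_py num_routes)

-- ===== LEMMAS AND PROOFS =====

-- address of the i-th route (A's closed form, restated over Nat)
def pvF (i : Nat) : Int := 671088640 + ((i / 254 : Nat) : Int) * 256 + ((i % 254 : Nat) : Int) + 1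

-- one iteration of B's loop body acting on the address pointer
def pvStep (a : Int) : Int := if PySem.Int.mod (a + 1) 256 = 255 then a + 3 else a + 1

lemma pvAltGo_succ (k : Nat) (a : Int) :
    pvAltGo (k + 1) a = (pvIpv4Str (pvStep a) ++ "/32") :: pvAltGo k (pvStep a) := by
  have h3 : a + 1 + 2 = a + 3 := by ring
  simp only [pvAltGo, pvStep, h3]

lemma pvStep_pvF (i : Nat) : pvStep (pvF i) = pvF (i + 1) := by
  simp only [pvStep, pvF, PySem.Int.mod_eq_emod_of_pos (show (0:Int) < 256 by norm_num)]
  split_ifs with h <;> omega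

lemma pvAltGo_from (k i : Nat) :
    pvAltGo k (pvF i) = (List.range k).map (fun j => pvIpv4Str (pvF (i + 1 + j)) ++ "/32") := by
  induction k generalizing i with
  | zero => simp [pvAltGo]
  | succ k ih =>
      rw [pvAltGo_succ, pvStep_pvF, ih (i + 1), List.range_succ_eq_map]
      simp only [List.map_cons, List.map_map, Nat.add_zero]
      refine congrArg (List.cons _) ?_
      exact List.map_congr_left fun j _ => by
        have : i + 1 + 1 + j = i + 1 + (j + 1) := by omega
        rw [this]; rfl

lemma pvStep_base : pvStep 671088640 = pvF 0 := by
  simp [pvStep, pvF, PySem.Int.mod]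

lemma pvAltGo_base (k : Nat) :
    pvAltGo k 671088640 = (List.range k).map (fun j => pvIpv4Str (pvF j) ++ "/32") := by
  cases k with
  | zero => simp [pvAltGo]
  | succ k =>
      rw [pvAltGo_succ, pvStep_base, pvAltGo_from k 0, List.range_succ_eq_map]
      simp only [List.map_cons, List.map_map]
      refine congrArg (List.cons _) ?_
      exact List.map_congr_left fun j _ => by
        have : 0 + 1 + j = j + 1 := by omega
        rw [this]; rfl

lemma pvAddr_eq (k : Nat) :
    671088640 + PySem.Int.floordiv (k : Int) 254 * 256 + (PySem.Int.mod (k : Int) 254 + 1) = pvF k := by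
  rw [PySem.Int.floordiv_eq_ediv_of_pos (by norm_num), PySem.Int.mod_eq_emod_of_pos (by norm_num), pvF]
  omega

-- ===== VERDICT (by name: the statement is the Claim_ definition above) =====
theorem iter_route_prefixes_py_spec : Claim_equal_iter_route_prefixes_py := by
  intro n _
  unfold Spec_iter_route_prefixes_py iter_route_prefixes_py iter_route_prefixes_py_alt
  rw [PySem.List.pyRange_one, pvAltGo_base, List.map_map, Int.sub_zero]
  refine List.map_congr_left fun k _ => ?_
  show pvIpv4Str (671088640 + PySem.Int.floordiv (0 + (k:Int)) 254 * 256 + (PySem.Int.mod (0 + (k:Int)) 254 + 1)) ++ "/32" = _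
  rw [zero_add, pvAddr_eq k]
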